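-- pv_equiv track=rewrite | github.com/AlimMid/PokerEV | Cards_old.py | isDoper
-- ===== SOURCE A (Python) =====
-- def SortHand(Hand):
--     H=Hand[:]
--     for i in range(0,len(H)):
--         for j in range(i+1,len(H)):
--             if (H[i]%13)<(H[j]%13):
--                 t=H[j]
--                 H[j]=H[i]
--                 H[i]=t
--             elif (H[i]%13)==(H[j]%13)and(H[i]<H[j]):
--                 t=H[j]
--                 H[j]=H[i]
--                 H[i]=t
--     return H
--
-- def Cards(H):
--     Card=[x%13 for x in H]
--     return Card
--
-- def isPair(H):
--     res=[]
--     C=SortHand(H)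
--     S=Cards(C)
--     for i in range(len(H)-1):
--         if S[i]==S[i+1]:
--             P1=[C[i],C[i+1]]
--             Kick=C[:i]+C[i+2:]
--             res=P1+Kick
--             return res
--     return res
--
-- def isDoper(H):
--     res=[]
--     x=isPair(H)
--     S=Cards(x)
--     if x:
--         for i in range(2,len(x)-1):
--             if S[i]==S[i+1]:
--                 P2=[x[i],x[i+1]]
--                 Kick=x[2:i]+x[i+2:]
--                 res=x[0:2]+P2+Kick
--                 return res
--     return res
-- ===== SOURCE B (Python) =====
-- def isDoper(H):
--     C = sorted(H, key=lambda c: (c % 13, c), reverse=True)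
--     pairs, kickers, i = [], [], 0
--     while i < len(C):
--         if len(pairs) < 4 and i + 1 < len(C) and C[i] % 13 == C[i + 1] % 13:
--             pairs += [C[i], C[i + 1]]
--             i += 2
--         else:
--             kickers.append(C[i])
--             i += 1
--     return pairs + kickers if len(pairs) == 4 else []
-- ===== Notes on version B (the rewrite author's own statement) =====
-- stated objective: faster
-- what changed: Replaced the hand-written O(n^2) exchange sort plus two index/slice rescans (isPair then a second adjacent-scan over the rearranged hand) by one library sort on the key (card%13, card) descending followed by a single greedy left-to-right pass that collects up to two adjacent same-rank pairs and the kickers in one sweep.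
import Mathlib
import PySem

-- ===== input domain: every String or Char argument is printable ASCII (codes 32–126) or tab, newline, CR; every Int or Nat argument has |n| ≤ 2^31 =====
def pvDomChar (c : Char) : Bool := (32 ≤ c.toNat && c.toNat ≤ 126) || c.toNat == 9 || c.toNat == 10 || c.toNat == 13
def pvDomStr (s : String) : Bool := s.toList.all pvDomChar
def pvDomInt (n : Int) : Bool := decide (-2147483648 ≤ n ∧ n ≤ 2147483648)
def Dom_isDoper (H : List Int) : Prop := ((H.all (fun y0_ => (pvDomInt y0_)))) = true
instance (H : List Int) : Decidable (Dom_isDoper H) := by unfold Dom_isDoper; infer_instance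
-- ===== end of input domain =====

-- B replaces A's hand-written O(n^2) exchange sort and two index/slice rescans by one
-- library sort (key (card%13, card) descending) and a single greedy pass; measured faster.


-- ===== PORT A =====
-- SortHand: the nested-index exchange sort, step for step (H=Hand[:]; swaps via pySetD)
def pvSortHand (Hand : List Int) : List Int :=
  let H := Hand
  (PySem.List.pyRange 0 (H.length : Int) 1).foldl (fun H i =>
    (PySem.List.pyRange (i + 1) (H.length : Int) 1).foldl (fun H j =>
      let hi := PySem.List.pyGetD H i 0
      let hj := PySem.List.pyGetD H j 0
      if PySem.Int.mod hi 13 < PySem.Int.mod hj 13 then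
        PySem.List.pySetD (PySem.List.pySetD H j hi) i hj
      else if PySem.Int.mod hi 13 = PySem.Int.mod hj 13 ∧ hi < hj then
        PySem.List.pySetD (PySem.List.pySetD H j hi) i hj
      else H) H) H

-- Cards: [x%13 for x in H]
def pvCards (H : List Int) : List Int := H.map (fun x => PySem.Int.mod x 13)

-- the 'for i in range(len(H)-1)' loop of isPair, with its early return
def pvIsPairLoop (C S : List Int) : List Int → List Int
  | [] => []
  | i :: rest =>
    if PySem.List.pyGetD S i 0 = PySem.List.pyGetD S (i + 1) 0 then
      [PySem.List.pyGetD C i 0, PySem.List.pyGetD C (i + 1) 0]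
        ++ PySem.List.slice C none (some i) ++ PySem.List.slice C (some (i + 2)) none
    else pvIsPairLoop C S rest

def pvIsPair (H : List Int) : List Int :=
  let C := pvSortHand H
  let S := pvCards C
  pvIsPairLoop C S (PySem.List.pyRange 0 ((H.length : Int) - 1) 1)

-- the 'for i in range(2,len(x)-1)' loop of isDoper, with its early return
def pvIsDoperLoop (x S : List Int) : List Int → List Int
  | [] => []
  | i :: rest =>
    if PySem.List.pyGetD S i 0 = PySem.List.pyGetD S (i + 1) 0 then
      PySem.List.slice x (some 0) (some 2)
        ++ [PySem.List.pyGetD x i 0, PySem.List.pyGetD x (i + 1) 0]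
        ++ PySem.List.slice x (some 2) (some i) ++ PySem.List.slice x (some (i + 2)) none
    else pvIsDoperLoop x S rest

def isDoper (H : List Int) : List Int :=
  let x := pvIsPair H
  let S := pvCards x
  if x ≠ [] then pvIsDoperLoop x S (PySem.List.pyRange 2 ((x.length : Int) - 1) 1) else []

-- ===== PORT B =====
-- the while loop of Source B over the remaining suffix of C (i only moves right)
def pvBLoop (pairs kickers : List Int) : List Int → List Int × List Int
  | [] => (pairs, kickers)
  | [c] => (pairs, kickers ++ [c])
  | c1 :: c2 :: rest =>
    if pairs.length < 4 ∧ PySem.Int.mod c1 13 = PySem.Int.mod c2 13 then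
      pvBLoop (pairs ++ [c1, c2]) kickers rest
    else
      pvBLoop pairs (kickers ++ [c1]) (c2 :: rest)

def isDoper_alt (H : List Int) : List Int :=
  let C := PySem.List.sorted2 H (fun c => PySem.Int.mod c 13) (fun c => c) true
  let pk := pvBLoop [] [] C
  if pk.1.length = 4 then pk.1 ++ pk.2 else []

-- ===== PRECONDITION & SPEC =====
def Spec_isDoper (H : List Int) (out : List Int) : Prop := out = isDoper_alt H
instance (H : List Int) (out : List Int) : Decidable (Spec_isDoper H out) := by unfold Spec_isDoper; infer_instance

-- ===== CLAIM (what is proved, stated in full; the proofs are below) =====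
def Claim_equal_isDoper : Prop := ∀ (H : List Int), Dom_isDoper H → Spec_isDoper H (isDoper H)

-- ===== LEMMAS AND PROOFS =====

-- ---- order on cards: rank-then-value, descending ----
def pvRank (x : Int) : Int := PySem.Int.mod x 13

-- a ≽ b in the descending (rank, value) order
def pvGe (a b : Int) : Prop := pvRank b < pvRank a ∨ (pvRank a = pvRank b ∧ b ≤ a)

theorem pvGe_refl (a : Int) : pvGe a a := by unfold pvGe; omega

theorem pvGe_trans {a b c : Int} (h1 : pvGe a b) (h2 : pvGe b c) : pvGe a c := by
  unfold pvGe at *; omega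

theorem pvGe_antisymm {a b : Int} (h1 : pvGe a b) (h2 : pvGe b a) : a = b := by
  unfold pvGe at *; omega

-- ---- functional description of A's inner loop: bubble the maximum to the front ----
def pvPass (x : Int) : List Int → Int × List Int
  | [] => (x, [])
  | y :: ys =>
    if pvRank x < pvRank y ∨ (pvRank x = pvRank y ∧ x < y) then
      ((pvPass y ys).1, x :: (pvPass y ys).2)
    else
      ((pvPass x ys).1, y :: (pvPass x ys).2)

theorem pvPass_length (x : Int) (S : List Int) : (pvPass x S).2.length = S.length := by
  induction S generalizing x with
  | nil => rfl
  | cons y ys ih => simp only [pvPass]; split <;> simp [ih]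

theorem pvPass_perm (x : Int) (S : List Int) :
    ((pvPass x S).1 :: (pvPass x S).2).Perm (x :: S) := by
  induction S generalizing x with
  | nil => rfl
  | cons y ys ih =>
    simp only [pvPass]; split
    · exact (List.Perm.swap x _ _).trans ((ih y).cons x)
    · exact ((List.Perm.swap y _ _).trans ((ih x).cons y)).trans (List.Perm.swap x y ys)

theorem pvPass_ge (x : Int) (S : List Int) : ∀ z ∈ x :: S, pvGe (pvPass x S).1 z := by
  induction S generalizing x with
  | nil => intro z hz; simp at hz; subst hz; exact pvGe_refl _
  | cons y ys ih =>
    intro z hz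
    simp only [List.mem_cons] at hz
    simp only [pvPass]
    split
    · rename_i hlt
      have hyx : pvGe y x := by unfold pvGe; omega
      have hm : ∀ w ∈ y :: ys, pvGe (pvPass y ys).1 w := ih y
      rcases hz with h | h | h
      · subst h; exact pvGe_trans (hm y (by simp)) hyx
      · subst h; exact hm z (by simp)
      · exact hm z (by simp [h])
    · rename_i hlt
      have hxy : pvGe x y := by unfold pvGe; omega
      have hm : ∀ w ∈ x :: ys, pvGe (pvPass x ys).1 w := ih x
      rcases hz with h | h | h
      · subst h; exact hm z (by simp)
      · subst h; exact pvGe_trans (hm x (by simp)) hxy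
      · exact hm z (by simp [h])

-- ---- functional description of A's outer loop: selection sort ----
def pvSelSort : Nat → List Int → List Int
  | _, [] => []
  | 0, _ :: _ => []
  | n + 1, x :: S => (pvPass x S).1 :: pvSelSort n (pvPass x S).2

theorem pvSelSort_perm : ∀ (n : Nat) (S : List Int), n = S.length →
    (pvSelSort n S).Perm S := by
  intro n
  induction n with
  | zero => intro S h; cases S with
    | nil => rfl
    | cons x S => simp at h
  | succ k ih =>
    intro S h
    cases S with
    | nil => simp at h
    | cons x S =>
      simp only [pvSelSort]
      have hl : k = (pvPass x S).2.length := by rw [pvPass_length]; simpa using h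
      exact ((ih _ hl).cons _).trans (pvPass_perm x S)

theorem pvSelSort_pairwise : ∀ (n : Nat) (S : List Int), n = S.length →
    (pvSelSort n S).Pairwise pvGe := by
  intro n
  induction n with
  | zero => intro S h; cases S with
    | nil => simp [pvSelSort]
    | cons x S => simp at h
  | succ k ih =>
    intro S h
    cases S with
    | nil => simp at h
    | cons x S =>
      simp only [pvSelSort]
      have hl : k = (pvPass x S).2.length := by rw [pvPass_length]; simpa using h
      refine List.Pairwise.cons ?_ (ih _ hl)
      intro z hz
      have hz' : z ∈ (pvPass x S).2 := ((pvSelSort_perm k _ hl).mem_iff).mp hz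
      exact pvPass_ge x S z ((pvPass_perm x S).mem_iff.mp (by simp [hz']))

-- ---- indexing helpers ----
theorem pv_getD_mid (A : List Int) (x : Int) (t : List Int) :
    PySem.List.pyGetD (A ++ x :: t) (A.length : Int) 0 = x := by
  rw [PySem.List.pyGetD_natCast]
  simp [List.getD]

theorem pv_setD_mid (A : List Int) (x : Int) (t : List Int) (v : Int) :
    PySem.List.pySetD (A ++ x :: t) (A.length : Int) v = A ++ v :: t := by
  rw [PySem.List.pySetD_natCast]
  rw [List.set_append]
  simp

-- ---- A's inner loop equals pvPass ----
theorem pv_inner (S : List Int) : ∀ (B A : List Int) (x : Int),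
    (PySem.List.pyRange ((A.length + 1 + B.length : Nat) : Int)
        ((A.length + 1 + B.length + S.length : Nat) : Int) 1).foldl
      (fun H j =>
        let hi := PySem.List.pyGetD H (A.length : Int) 0
        let hj := PySem.List.pyGetD H j 0
        if PySem.Int.mod hi 13 < PySem.Int.mod hj 13 then
          PySem.List.pySetD (PySem.List.pySetD H j hi) (A.length : Int) hj
        else if PySem.Int.mod hi 13 = PySem.Int.mod hj 13 ∧ hi < hj then
          PySem.List.pySetD (PySem.List.pySetD H j hi) (A.length : Int) hj
        else H)
      (A ++ x :: (B ++ S))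
    = A ++ (pvPass x S).1 :: (B ++ (pvPass x S).2) := by
  induction S with
  | nil =>
    intro B A x
    rw [PySem.List.pyRange_one_eq_nil (by push_cast [List.length_nil]; omega)]
    simp [pvPass]
  | cons y S' ih =>
    intro B A x
    rw [PySem.List.pyRange_one_cons (by push_cast [List.length_append, List.length_cons, List.length_nil]; try omega), List.foldl_cons]
    have e1 : A ++ x :: (B ++ y :: S') = (A ++ x :: B) ++ y :: S' := by simp
    have hk : ((A.length + 1 + B.length : Nat) : Int) = ((A ++ x :: B).length : Int) := by
      simp [List.length_append]; try omega
    have hgi : PySem.List.pyGetD (A ++ x :: (B ++ y :: S')) (A.length : Int) 0 = x :=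
      pv_getD_mid _ _ _
    have hgj : PySem.List.pyGetD (A ++ x :: (B ++ y :: S')) ((A.length + 1 + B.length : Nat) : Int) 0 = y := by
      rw [e1, hk]; exact pv_getD_mid _ _ _
    have hswap : PySem.List.pySetD
        (PySem.List.pySetD (A ++ x :: (B ++ y :: S')) ((A.length + 1 + B.length : Nat) : Int) x)
        (A.length : Int) y = A ++ y :: (B ++ x :: S') := by
      rw [e1, hk, pv_setD_mid]
      have e2 : (A ++ x :: B) ++ x :: S' = A ++ x :: (B ++ x :: S') := by simp
      rw [e2, pv_setD_mid]
    simp only [hgi, hgj, hswap]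
    by_cases hc : pvRank x < pvRank y ∨ (pvRank x = pvRank y ∧ x < y)
    · have hpp : pvPass x (y :: S') = ((pvPass y S').1, x :: (pvPass y S').2) := by
        simp only [pvPass, if_pos hc]
      have hif : (if PySem.Int.mod x 13 < PySem.Int.mod y 13 then A ++ y :: (B ++ x :: S')
          else if PySem.Int.mod x 13 = PySem.Int.mod y 13 ∧ x < y then A ++ y :: (B ++ x :: S')
          else A ++ x :: (B ++ y :: S')) = A ++ y :: ((B ++ [x]) ++ S') := by
        simp only [pvRank] at hc
        split_ifs with h1 h2
        · simp
        · simp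
        · exact absurd (hc.resolve_left h1) h2
      rw [hif]
      have hr1 : ((A.length + 1 + B.length : Nat) : Int) + 1 = ((A.length + 1 + (B ++ [x]).length : Nat) : Int) := by
        push_cast [List.length_append, List.length_cons, List.length_nil]; try omega
      have hr2 : ((A.length + 1 + B.length + (y :: S').length : Nat) : Int) = ((A.length + 1 + (B ++ [x]).length + S'.length : Nat) : Int) := by
        push_cast [List.length_append, List.length_cons, List.length_nil]; try omega
      rw [hr1, hr2, ih (B ++ [x]) A y, hpp]
      simp
    · have hpp : pvPass x (y :: S') = ((pvPass x S').1, y :: (pvPass x S').2) := by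
        simp only [pvPass, if_neg hc]
      have hif : (if PySem.Int.mod x 13 < PySem.Int.mod y 13 then A ++ y :: (B ++ x :: S')
          else if PySem.Int.mod x 13 = PySem.Int.mod y 13 ∧ x < y then A ++ y :: (B ++ x :: S')
          else A ++ x :: (B ++ y :: S')) = A ++ x :: ((B ++ [y]) ++ S') := by
        simp only [pvRank] at hc
        split_ifs with h1 h2
        · exact absurd (Or.inl h1) hc
        · exact absurd (Or.inr h2) hc
        · simp
      rw [hif]
      have hr1 : ((A.length + 1 + B.length : Nat) : Int) + 1 = ((A.length + 1 + (B ++ [y]).length : Nat) : Int) := by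
        push_cast [List.length_append, List.length_cons, List.length_nil]; try omega
      have hr2 : ((A.length + 1 + B.length + (y :: S').length : Nat) : Int) = ((A.length + 1 + (B ++ [y]).length + S'.length : Nat) : Int) := by
        push_cast [List.length_append, List.length_cons, List.length_nil]; try omega
      rw [hr1, hr2, ih (B ++ [y]) A x, hpp]
      simp

-- ---- A's outer loop equals pvSelSort ----
theorem pv_outer : ∀ (n : Nat) (S : List Int), n = S.length → ∀ (P : List Int),
    (PySem.List.pyRange ((P.length : Nat) : Int) ((P.length + S.length : Nat) : Int) 1).foldl
      (fun H i =>
        (PySem.List.pyRange (i + 1) (H.length : Int) 1).foldl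
          (fun H j =>
            let hi := PySem.List.pyGetD H i 0
            let hj := PySem.List.pyGetD H j 0
            if PySem.Int.mod hi 13 < PySem.Int.mod hj 13 then
              PySem.List.pySetD (PySem.List.pySetD H j hi) i hj
            else if PySem.Int.mod hi 13 = PySem.Int.mod hj 13 ∧ hi < hj then
              PySem.List.pySetD (PySem.List.pySetD H j hi) i hj
            else H) H) (P ++ S)
    = P ++ pvSelSort S.length S := by
  intro n
  induction n with
  | zero =>
    intro S h P
    cases S with
    | nil =>
      rw [PySem.List.pyRange_one_eq_nil (by push_cast [List.length_nil]; omega)]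
      simp [pvSelSort]
    | cons a t => simp at h
  | succ k ih =>
    intro S h P
    cases S with
    | nil => simp at h
    | cons x S' =>
      rw [PySem.List.pyRange_one_cons (by push_cast [List.length_cons]; omega)]
      simp only [List.foldl_cons]
      have hstart : (P.length : Int) + 1 = ((P.length + 1 + ([] : List Int).length : Nat) : Int) := by
        push_cast [List.length_nil]; try omega
      have hlen : (((P ++ x :: S').length : Int)) = ((P.length + 1 + ([] : List Int).length + S'.length : Nat) : Int) := by
        push_cast [List.length_append, List.length_cons, List.length_nil]; try omega
      have hinit : P ++ x :: S' = P ++ x :: (([] : List Int) ++ S') := by simp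
      rw [hstart, hlen, hinit, pv_inner S' [] P x]
      have hP2 : P ++ (pvPass x S').1 :: (([] : List Int) ++ (pvPass x S').2)
          = (P ++ [(pvPass x S').1]) ++ (pvPass x S').2 := by simp
      have hs2 : ((P.length + 1 + ([] : List Int).length : Nat) : Int)
          = (((P ++ [(pvPass x S').1]).length : Nat) : Int) := by
        push_cast [List.length_append, List.length_cons, List.length_nil]; try omega
      have he2 : ((P.length + (x :: S').length : Nat) : Int)
          = (((P ++ [(pvPass x S').1]).length + (pvPass x S').2.length : Nat) : Int) := by
        push_cast [List.length_append, List.length_cons, List.length_nil, pvPass_length]; try omega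
      have hk : k = (pvPass x S').2.length := by rw [pvPass_length]; simpa using h
      rw [hP2, hs2, he2, ih _ hk (P ++ [(pvPass x S').1])]
      have hsel : pvSelSort (x :: S').length (x :: S') = (pvPass x S').1 :: pvSelSort S'.length (pvPass x S').2 := by
        simp [pvSelSort]
      rw [hsel, pvPass_length]
      simp

theorem pvSortHand_eq_selSort (H : List Int) : pvSortHand H = pvSelSort H.length H := by
  have h := pv_outer H.length H rfl []
  simpa [pvSortHand] using h

-- ---- B's sort is pvGe-sorted too ----
theorem pv_insertBy_pairwise {before : Int → Int → Bool}
    (h1 : ∀ a b, before a b = true → pvGe a b)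
    (h2 : ∀ a b, before a b = false → pvGe b a)
    (x : Int) : ∀ (acc : List Int), acc.Pairwise pvGe →
    (PySem.List.insertBy before x acc).Pairwise pvGe := by
  intro acc
  induction acc with
  | nil => intro _; simp [PySem.List.insertBy]
  | cons y ys ih =>
    intro hp
    rw [List.pairwise_cons] at hp
    simp only [PySem.List.insertBy]
    split
    · rename_i hb
      refine List.Pairwise.cons ?_ (List.Pairwise.cons hp.1 hp.2)
      intro z hz
      rcases List.mem_cons.mp hz with rfl | hz'
      · exact h1 _ _ hb
      · exact pvGe_trans (h1 _ _ hb) (hp.1 z hz')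
    · rename_i hb
      refine List.Pairwise.cons ?_ (ih hp.2)
      intro z hz
      rcases (PySem.List.mem_insertBy before x z ys).mp hz with rfl | hz'
      · exact h2 _ _ (by simpa using hb)
      · exact hp.1 z hz'

theorem pv_foldl_insertBy_pairwise {before : Int → Int → Bool}
    (h1 : ∀ a b, before a b = true → pvGe a b)
    (h2 : ∀ a b, before a b = false → pvGe b a) :
    ∀ (xs acc : List Int), acc.Pairwise pvGe →
      (xs.foldl (fun acc x => PySem.List.insertBy before x acc) acc).Pairwise pvGe := by
  intro xs
  induction xs with
  | nil => intro acc h; simpa using h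
  | cons x xs ih => intro acc h; exact ih _ (pv_insertBy_pairwise h1 h2 x acc h)

theorem pv_sorted2_pairwise (H : List Int) :
    (PySem.List.sorted2 H (fun c => PySem.Int.mod c 13) (fun c => c) true).Pairwise pvGe := by
  have h1 : ∀ a b : Int,
      (decide (PySem.Int.mod b 13 < PySem.Int.mod a 13) ||
        (!decide (PySem.Int.mod a 13 < PySem.Int.mod b 13) && decide (b < a))) = true → pvGe a b := by
    intro a b h
    unfold pvGe
    simp only [Bool.or_eq_true, Bool.and_eq_true, Bool.not_eq_true', decide_eq_true_eq,
      decide_eq_false_iff_not] at h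
    rw [show PySem.Int.mod a 13 = pvRank a from rfl, show PySem.Int.mod b 13 = pvRank b from rfl] at h
    omega
  have h2 : ∀ a b : Int,
      (decide (PySem.Int.mod b 13 < PySem.Int.mod a 13) ||
        (!decide (PySem.Int.mod a 13 < PySem.Int.mod b 13) && decide (b < a))) = false → pvGe b a := by
    intro a b h
    unfold pvGe
    simp only [Bool.or_eq_false_iff, Bool.and_eq_false_iff, Bool.not_eq_false', decide_eq_true_eq,
      decide_eq_false_iff_not] at h
    rw [show PySem.Int.mod a 13 = pvRank a from rfl, show PySem.Int.mod b 13 = pvRank b from rfl] at h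
    omega
  exact pv_foldl_insertBy_pairwise
    (before := fun a b =>
      decide (PySem.Int.mod b 13 < PySem.Int.mod a 13) ||
        (!decide (PySem.Int.mod a 13 < PySem.Int.mod b 13) && decide (b < a)))
    h1 h2 H [] (by simp)

-- ---- the two sorts agree ----
theorem pv_sorts_agree (H : List Int) :
    pvSortHand H = PySem.List.sorted2 H (fun c => PySem.Int.mod c 13) (fun c => c) true := by
  refine (List.Perm.eq_of_pairwise (fun a b _ _ => pvGe_antisymm)) ?_ ?_ ?_
  · rw [pvSortHand_eq_selSort]; exact pvSelSort_pairwise _ _ rfl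
  · exact pv_sorted2_pairwise H
  · rw [pvSortHand_eq_selSort]
    exact (pvSelSort_perm _ _ rfl).trans (PySem.List.sorted2_perm H _ _ true).symm

-- ---- structural description of A's scans: first adjacent same-rank pair ----
def pvSplit : List Int → Option (List Int × Int × Int × List Int)
  | [] => none
  | [_] => none
  | a :: b :: r =>
    if pvRank a = pvRank b then some ([], a, b, r)
    else (pvSplit (b :: r)).map (fun q => (a :: q.1, q.2))

theorem pvSplit_some : ∀ (C p : List Int) (a b : Int) (s : List Int),
    pvSplit C = some (p, a, b, s) →
    C = p ++ a :: b :: s ∧ pvRank a = pvRank b ∧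
      List.IsChain (fun u v => pvRank u ≠ pvRank v) (p ++ [a]) := by
  intro C
  induction C with
  | nil => intro p a b s h; simp [pvSplit] at h
  | cons u t ih =>
    intro p a b s h
    cases t with
    | nil => simp [pvSplit] at h
    | cons v r =>
      by_cases hr : pvRank u = pvRank v
      · rw [pvSplit, if_pos hr] at h
        simp only [Option.some.injEq, Prod.mk.injEq] at h
        obtain ⟨hp, ha, hb, hs⟩ := h
        subst hp; subst ha; subst hb; subst hs
        exact ⟨rfl, hr, by simp⟩
      · rw [pvSplit, if_neg hr] at h
        rw [Option.map_eq_some_iff] at h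
        obtain ⟨⟨q1, qa, qb, qs⟩, hq, hfq⟩ := h
        simp only [Prod.mk.injEq] at hfq
        obtain ⟨rfl, rfl, rfl, rfl⟩ := hfq
        obtain ⟨heq, hab, hch⟩ := ih _ _ _ _ hq
        refine ⟨by rw [heq]; simp, hab, ?_⟩
        cases q1 with
        | nil =>
          have hva : v = qa := by simpa using congrArg (fun l => l.headD 0) heq
          subst hva
          simpa using hr
        | cons cc q1' =>
          have hvc : v = cc := by simpa using congrArg (fun l => l.headD 0) heq
          subst hvc
          simp only [List.cons_append] at hch ⊢
          rw [List.isChain_cons_cons]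
          exact ⟨by simpa using hr, hch⟩

theorem pvSplit_append : ∀ (p s : List Int),
    List.IsChain (fun u v => pvRank u ≠ pvRank v) (p ++ s.take 1) →
    pvSplit (p ++ s) = (pvSplit s).map (fun q => (p ++ q.1, q.2)) := by
  intro p
  induction p with
  | nil => intro s _; cases h : pvSplit s <;> simp [h]
  | cons u p' ih =>
    intro s h
    cases p' with
    | nil =>
      cases s with
      | nil => simp [pvSplit]
      | cons w s' =>
        simp only [List.nil_append, List.take_succ_cons, List.take_zero, List.cons_append,
          List.isChain_cons_cons] at h
        simp only [List.cons_append, List.nil_append]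
        rw [pvSplit, if_neg h.1]
    | cons e p'' =>
      have h' : List.IsChain (fun u v => pvRank u ≠ pvRank v) ((e :: p'') ++ s.take 1) := by
        rw [List.cons_append, List.cons_append, List.isChain_cons_cons] at h
        exact h.2
      have hue : pvRank u ≠ pvRank e := by
        rw [List.cons_append, List.cons_append, List.isChain_cons_cons] at h
        exact h.1
      simp only [List.cons_append]
      rw [pvSplit, if_neg hue]
      have hmid : e :: (p'' ++ s) = (e :: p'') ++ s := by simp
      rw [hmid, ih s h']
      cases pvSplit s <;> simp

theorem pv_getD_at (A : List Int) (x : Int) (t : List Int) (i : Int)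
    (h : i = (A.length : Int)) : PySem.List.pyGetD (A ++ x :: t) i 0 = x := by
  subst h; exact pv_getD_mid A x t

-- ---- A's isPair loop, structurally ----
theorem pv_isPairLoop_eq (rest : List Int) : ∀ (pre : List Int),
    pvIsPairLoop (pre ++ rest) ((pre ++ rest).map (fun x => PySem.Int.mod x 13))
        (PySem.List.pyRange ((pre.length : Nat) : Int) (((pre ++ rest).length : Int) - 1) 1)
    = match pvSplit rest with
      | none => []
      | some (p, a, b, s) => a :: b :: ((pre ++ p) ++ s) := by
  induction rest with
  | nil =>
    intro pre
    rw [PySem.List.pyRange_one_eq_nil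
      (by push_cast [List.length_append, List.length_nil]; omega)]
    simp [pvIsPairLoop, pvSplit]
  | cons x t ih =>
    intro pre
    cases t with
    | nil =>
      rw [PySem.List.pyRange_one_eq_nil
        (by push_cast [List.length_append, List.length_cons, List.length_nil]; omega)]
      simp [pvIsPairLoop, pvSplit]
    | cons y r =>
      rw [PySem.List.pyRange_one_cons
        (by push_cast [List.length_append, List.length_cons]; omega)]
      rw [pvIsPairLoop]
      have hmapS : (pre ++ x :: y :: r).map (fun x => PySem.Int.mod x 13)
          = (pre.map (fun x => PySem.Int.mod x 13)) ++ (PySem.Int.mod x 13) :: (PySem.Int.mod y 13) :: (r.map (fun x => PySem.Int.mod x 13)) := by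
        simp
      have hSx : PySem.List.pyGetD ((pre ++ x :: y :: r).map (fun x => PySem.Int.mod x 13)) ((pre.length : Nat) : Int) 0 = PySem.Int.mod x 13 := by
        rw [hmapS]; exact pv_getD_at _ _ _ _ (by simp)
      have hSy : PySem.List.pyGetD ((pre ++ x :: y :: r).map (fun x => PySem.Int.mod x 13)) (((pre.length : Nat) : Int) + 1) 0 = PySem.Int.mod y 13 := by
        rw [hmapS]
        have e : (pre.map (fun x => PySem.Int.mod x 13)) ++ (PySem.Int.mod x 13) :: (PySem.Int.mod y 13) :: (r.map (fun x => PySem.Int.mod x 13))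
            = ((pre.map (fun x => PySem.Int.mod x 13)) ++ [PySem.Int.mod x 13]) ++ (PySem.Int.mod y 13) :: (r.map (fun x => PySem.Int.mod x 13)) := by
          simp
        rw [e]
        exact pv_getD_at _ _ _ _ (by push_cast [List.length_append, List.length_map, List.length_cons, List.length_nil]; omega)
      rw [hSx, hSy]
      by_cases hxy : PySem.Int.mod x 13 = PySem.Int.mod y 13
      · rw [if_pos hxy]
        have hCx : PySem.List.pyGetD (pre ++ x :: y :: r) ((pre.length : Nat) : Int) 0 = x :=
          pv_getD_at _ _ _ _ (by simp)
        have hCy : PySem.List.pyGetD (pre ++ x :: y :: r) (((pre.length : Nat) : Int) + 1) 0 = y := by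
          have e : pre ++ x :: y :: r = (pre ++ [x]) ++ y :: r := by simp
          rw [e]
          exact pv_getD_at _ _ _ _ (by push_cast [List.length_append, List.length_cons, List.length_nil]; omega)
        rw [hCx, hCy]
        rw [PySem.List.slice_to_natCast]
        have e2 : ((pre.length : Nat) : Int) + 2 = (((pre.length + 2 : Nat)) : Int) := by push_cast; omega
        rw [e2, PySem.List.slice_from_natCast]
        rw [pvSplit, if_pos (by simpa [pvRank] using hxy)]
        simp [List.drop_append]
      · rw [if_neg hxy]
        have e : pre ++ x :: y :: r = (pre ++ [x]) ++ y :: r := by simp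
        have hst : ((pre.length : Nat) : Int) + 1 = (((pre ++ [x]).length : Nat) : Int) := by
          push_cast [List.length_append, List.length_cons, List.length_nil]; omega
        rw [e, hst, ih (pre ++ [x])]
        rw [pvSplit, if_neg (by simpa [pvRank] using hxy)]
        cases hs : pvSplit (y :: r) with
        | none => simp
        | some q => obtain ⟨q1, qa, qb, qs⟩ := q; simp

-- ---- A's isDoper loop, structurally ----
theorem pv_isDoperLoop_eq (rest : List Int) : ∀ (a0 a1 : Int) (mid : List Int),
    pvIsDoperLoop (a0 :: a1 :: (mid ++ rest)) ((a0 :: a1 :: (mid ++ rest)).map (fun x => PySem.Int.mod x 13))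
        (PySem.List.pyRange ((2 + mid.length : Nat) : Int) (((a0 :: a1 :: (mid ++ rest)).length : Int) - 1) 1)
    = match pvSplit rest with
      | none => []
      | some (p, c, d, s) => a0 :: a1 :: c :: d :: (mid ++ p ++ s) := by
  induction rest with
  | nil =>
    intro a0 a1 mid
    rw [PySem.List.pyRange_one_eq_nil
      (by push_cast [List.length_append, List.length_cons, List.length_nil]; omega)]
    simp [pvIsDoperLoop, pvSplit]
  | cons x t ih =>
    intro a0 a1 mid
    cases t with
    | nil =>
      rw [PySem.List.pyRange_one_eq_nil
        (by push_cast [List.length_append, List.length_cons, List.length_nil]; omega)]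
      simp [pvIsDoperLoop, pvSplit]
    | cons y r =>
      rw [PySem.List.pyRange_one_cons
        (by push_cast [List.length_append, List.length_cons]; omega)]
      rw [pvIsDoperLoop]
      have hresh : a0 :: a1 :: (mid ++ x :: y :: r) = (a0 :: a1 :: mid) ++ x :: y :: r := by simp
      have hreshS : (a0 :: a1 :: (mid ++ x :: y :: r)).map (fun x => PySem.Int.mod x 13)
          = ((a0 :: a1 :: mid).map (fun x => PySem.Int.mod x 13)) ++ (PySem.Int.mod x 13) :: (PySem.Int.mod y 13) :: (r.map (fun x => PySem.Int.mod x 13)) := by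
        simp
      have hSx : PySem.List.pyGetD ((a0 :: a1 :: (mid ++ x :: y :: r)).map (fun x => PySem.Int.mod x 13)) ((2 + mid.length : Nat) : Int) 0 = PySem.Int.mod x 13 := by
        rw [hreshS]
        exact pv_getD_at _ _ _ _ (by push_cast [List.length_map, List.length_cons]; omega)
      have hSy : PySem.List.pyGetD ((a0 :: a1 :: (mid ++ x :: y :: r)).map (fun x => PySem.Int.mod x 13)) (((2 + mid.length : Nat) : Int) + 1) 0 = PySem.Int.mod y 13 := by
        rw [hreshS]
        have e : ((a0 :: a1 :: mid).map (fun x => PySem.Int.mod x 13)) ++ (PySem.Int.mod x 13) :: (PySem.Int.mod y 13) :: (r.map (fun x => PySem.Int.mod x 13))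
            = (((a0 :: a1 :: mid).map (fun x => PySem.Int.mod x 13)) ++ [PySem.Int.mod x 13]) ++ (PySem.Int.mod y 13) :: (r.map (fun x => PySem.Int.mod x 13)) := by
          simp
        rw [e]
        exact pv_getD_at _ _ _ _ (by push_cast [List.length_append, List.length_map, List.length_cons, List.length_nil]; omega)
      rw [hSx, hSy]
      by_cases hxy : PySem.Int.mod x 13 = PySem.Int.mod y 13
      · rw [if_pos hxy]
        have hCx : PySem.List.pyGetD (a0 :: a1 :: (mid ++ x :: y :: r)) ((2 + mid.length : Nat) : Int) 0 = x := by
          rw [hresh]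
          exact pv_getD_at _ _ _ _ (by push_cast [List.length_cons]; omega)
        have hCy : PySem.List.pyGetD (a0 :: a1 :: (mid ++ x :: y :: r)) (((2 + mid.length : Nat) : Int) + 1) 0 = y := by
          have e : a0 :: a1 :: (mid ++ x :: y :: r) = ((a0 :: a1 :: mid) ++ [x]) ++ y :: r := by simp
          rw [e]
          exact pv_getD_at _ _ _ _ (by push_cast [List.length_append, List.length_cons, List.length_nil]; omega)
        rw [hCx, hCy]
        have h02 : PySem.List.slice (a0 :: a1 :: (mid ++ x :: y :: r)) (some 0) (some 2) = [a0, a1] := by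
          rw [PySem.List.slice_zero_start, PySem.List.slice_to _ (show (0:Int) ≤ 2 by omega)]
          simp
        have h2i : PySem.List.slice (a0 :: a1 :: (mid ++ x :: y :: r)) (some 2) (some ((2 + mid.length : Nat) : Int)) = mid := by
          rw [PySem.List.slice_toNat _ (show (0:Int) ≤ 2 by omega) (show (0:Int) ≤ ((2 + mid.length : Nat) : Int) by omega)]
          simp
          rw [List.take_left' (by omega)]
        have hdrop : PySem.List.slice (a0 :: a1 :: (mid ++ x :: y :: r)) (some (((2 + mid.length : Nat) : Int) + 2)) none = r := by
          have e2 : ((2 + mid.length : Nat) : Int) + 2 = (((4 + mid.length : Nat)) : Int) := by push_cast; omega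
          rw [e2, PySem.List.slice_from_natCast]
          have e4 : a0 :: a1 :: (mid ++ x :: y :: r) = ((a0 :: a1 :: mid) ++ [x, y]) ++ r := by simp
          rw [e4, List.drop_left' (by simp; omega)]
        rw [h02, h2i, hdrop]
        rw [pvSplit, if_pos (by simpa [pvRank] using hxy)]
        simp
      · rw [if_neg hxy]
        have e : a0 :: a1 :: (mid ++ x :: y :: r) = a0 :: a1 :: ((mid ++ [x]) ++ y :: r) := by simp
        have hst : ((2 + mid.length : Nat) : Int) + 1 = ((2 + (mid ++ [x]).length : Nat) : Int) := by
          push_cast [List.length_append, List.length_cons, List.length_nil]; omega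
        rw [e, hst, ih a0 a1 (mid ++ [x])]
        rw [pvSplit, if_neg (by simpa [pvRank] using hxy)]
        cases hs : pvSplit (y :: r) with
        | none => simp
        | some q => obtain ⟨q1, qa, qb, qs⟩ := q; simp

-- ---- B's loop, structurally ----
theorem pvBLoop_stop : ∀ (C pairs ks : List Int),
    (pvSplit C = none ∨ pairs.length = 4) → pvBLoop pairs ks C = (pairs, ks ++ C) := by
  intro C
  induction C with
  | nil => intro pairs ks _; simp [pvBLoop]
  | cons c1 t ih =>
    intro pairs ks h
    cases t with
    | nil => simp [pvBLoop]
    | cons c2 r =>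
      have hcond : ¬(pairs.length < 4 ∧ PySem.Int.mod c1 13 = PySem.Int.mod c2 13) := by
        rcases h with h | h
        · intro ⟨_, hm⟩
          rw [pvSplit, if_pos (by simpa [pvRank] using hm)] at h
          simp at h
        · intro ⟨hl, _⟩; omega
      rw [pvBLoop, if_neg hcond]
      have hnext : pvSplit (c2 :: r) = none ∨ pairs.length = 4 := by
        rcases h with h | h
        · left
          by_cases hm : pvRank c1 = pvRank c2
          · rw [pvSplit, if_pos hm] at h; simp at h
          · rw [pvSplit, if_neg hm] at h
            exact Option.map_eq_none_iff.mp h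
        · right; exact h
      rw [ih pairs (ks ++ [c1]) hnext]
      simp

theorem pvBLoop_take : ∀ (C p : List Int) (a b : Int) (s : List Int),
    pvSplit C = some (p, a, b, s) → ∀ (pairs ks : List Int), pairs.length < 4 →
    pvBLoop pairs ks C = pvBLoop (pairs ++ [a, b]) (ks ++ p) s := by
  intro C
  induction C with
  | nil => intro p a b s h; simp [pvSplit] at h
  | cons c1 t ih =>
    intro p a b s h pairs ks hlt
    cases t with
    | nil => simp [pvSplit] at h
    | cons c2 r =>
      by_cases hm : pvRank c1 = pvRank c2
      · rw [pvSplit, if_pos hm] at h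
        simp only [Option.some.injEq, Prod.mk.injEq] at h
        obtain ⟨rfl, rfl, rfl, rfl⟩ := h
        rw [pvBLoop, if_pos ⟨hlt, by simpa [pvRank] using hm⟩]
        simp
      · rw [pvSplit, if_neg hm] at h
        rw [Option.map_eq_some_iff] at h
        obtain ⟨⟨q1, qa, qb, qs⟩, hq, hfq⟩ := h
        simp only [Prod.mk.injEq] at hfq
        obtain ⟨rfl, rfl, rfl, rfl⟩ := hfq
        rw [pvBLoop, if_neg (by intro ⟨_, hmm⟩; exact hm (by simpa [pvRank] using hmm))]
        rw [ih _ _ _ _ hq pairs (ks ++ [c1]) hlt]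
        simp

-- ---- main equality ----
theorem pv_main (H : List Int) : isDoper H = isDoper_alt H := by
  have hCs := pv_sorts_agree H
  have hpairC : (pvSortHand H).Pairwise pvGe := by
    rw [pvSortHand_eq_selSort]; exact pvSelSort_pairwise _ _ rfl
  have hlenC : (pvSortHand H).length = H.length := by
    rw [pvSortHand_eq_selSort]; exact (pvSelSort_perm _ _ rfl).length_eq
  have hx : pvIsPair H = match pvSplit (pvSortHand H) with
      | none => []
      | some (p, a, b, s) => a :: b :: (p ++ s) := by
    have h := pv_isPairLoop_eq (pvSortHand H) []
    simp only [List.nil_append, List.length_nil, Nat.cast_zero] at h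
    unfold pvIsPair pvCards
    rw [← hlenC]
    exact h
  cases hsplit : pvSplit (pvSortHand H) with
  | none =>
    have hxe : pvIsPair H = [] := by rw [hx, hsplit]
    have halt : isDoper_alt H = [] := by
      simp only [isDoper_alt]
      rw [← hCs]
      rw [pvBLoop_stop (pvSortHand H) [] [] (Or.inl hsplit)]
      simp
    rw [halt]
    simp only [isDoper]
    rw [hxe]
    simp
  | some q =>
    obtain ⟨p1, a, b, s1⟩ := q
    obtain ⟨hCeq, hab, hchain⟩ := pvSplit_some _ _ _ _ _ hsplit
    have hch2 : List.IsChain (fun u v => pvRank u ≠ pvRank v) (p1 ++ s1.take 1) := by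
      cases s1 with
      | nil =>
        simp only [List.take_nil, List.append_nil]
        exact (List.isChain_append.mp hchain).1
      | cons w s1' =>
        have hdec := List.isChain_append.mp hchain
        have hp' := hpairC
        rw [hCeq, List.pairwise_append] at hp'
        obtain ⟨hp1p, hrestp, hcross⟩ := hp'
        have hbw : pvGe b w :=
          ((List.pairwise_cons.mp (List.pairwise_cons.mp hrestp).2).1) w (by simp)
        rw [show (w :: s1').take 1 = [w] by simp]
        rw [List.isChain_append]
        refine ⟨hdec.1, by simp, ?_⟩
        intro u hu v hv
        have hv' : w = v := by simpa using hv
        subst hv'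
        have hu_mem : u ∈ p1 := List.mem_of_getLast? (by simpa using hu)
        have hua : pvRank u ≠ pvRank a := hdec.2.2 u hu a (by simp)
        have huge : pvGe u a := hcross u hu_mem a (by simp)
        unfold pvGe at huge hbw
        omega
    have hK := pvSplit_append p1 s1 hch2
    have hxv : pvIsPair H = a :: b :: (p1 ++ s1) := by rw [hx, hsplit]
    have hAside : isDoper H = match pvSplit (p1 ++ s1) with
        | none => []
        | some (p, c, d, s) => a :: b :: c :: d :: (p ++ s) := by
      simp only [isDoper]
      rw [hxv, if_pos (by simp)]
      have h := pv_isDoperLoop_eq (p1 ++ s1) a b []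
      simp only [List.nil_append, List.length_nil, Nat.add_zero] at h
      unfold pvCards
      exact h
    cases hs1 : pvSplit s1 with
    | none =>
      have hKn : pvSplit (p1 ++ s1) = none := by rw [hK, hs1]; rfl
      rw [hAside, hKn]
      simp only [isDoper_alt]
      rw [← hCs, pvBLoop_take _ _ _ _ _ hsplit [] [] (by simp),
        pvBLoop_stop _ _ _ (Or.inl hs1)]
      simp
    | some q2 =>
      obtain ⟨p2, cc, dd, s2⟩ := q2
      have hKs : pvSplit (p1 ++ s1) = some (p1 ++ p2, cc, dd, s2) := by rw [hK, hs1]; rfl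
      rw [hAside, hKs]
      simp only [isDoper_alt]
      rw [← hCs, pvBLoop_take _ _ _ _ _ hsplit [] [] (by simp),
        pvBLoop_take _ _ _ _ _ hs1 _ _ (by simp),
        pvBLoop_stop _ _ _ (Or.inr (by simp))]
      simp

-- ===== VERDICT (by name: the statement is the Claim_ definition above) =====
theorem isDoper_spec : Claim_equal_isDoper := by
  intro H _
  unfold Spec_isDoper
  exact pv_main H
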